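/- GENERATED by mk_final_copies.py from the proof of the farm's unit `start_decoder.F5c` (farm:start_decoder.F5c.1: Proof.lean) as the
   re-elaboration sweep compiled it — do not edit. -/
import Asan.CheckWalk
import Vorbis.Spec.Reader
import Vorbis.Spec.Units.start_decoder_F5c

open X86 X86.User Asan Vorbis Vorbis.Spec Vorbis.Spec.StartDecoder

set_option maxRecDepth 4000
set_option maxHeartbeats 4000000

namespace Vorbis.Spec.start_decoder_F5c

/-- The low byte of a 4-bit number held in a 32-bit register (`mov [rbx+635H], r12b`). -/
theorem f5c_low8 : ∀ z : Nat, z < 16 → (BitVec.setWidth 8 (BitVec.ofNat 32 z)).toNat = z := by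
  decide

/-- `1 << rangebits` as the word that is stored into `Xlist[1]` (`shl eax, cl ; mov [rbx+154H], r12w`), `rangebits < 16`. -/
theorem f5c_shl16 : ∀ z : Nat, z < 16 →
    (BitVec.setWidth 16 (1#32 <<< (z % 32))).toNat = 2 ^ z := by
  decide

/-- **Segment F5c of `start_decoder`** (`cut217` 0x1155f8 … 0x11565f, C lines 4003 – 4007): the four checked stores `rangebits = al`,
`Xlist[0] = 0`, `Xlist[1] = 1 << rangebits`, `values = 2`, then `j = 0` (r13d := the literal-0 slot Z24) and the jump to the head of
loop 4007 (`AtF5c.first_outer`). -/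
theorem f5c_walk {Lay : Layout} (hLay : Lay.hi = 0x1000000) {μ : Microarch} (hμ : UserX.MicroOK μ) {u₀ : State}
    (hcode : HasCodeNat Lay u₀ Vorbis.L.start_decoder.entry Vorbis.Code.code_start_decoder.nat Vorbis.L.start_decoder.size)
    (hst1 : Asan.SmallCheck Lay μ Vorbis.WayInv (Vorbis.CodeOK u₀) [.rax, .rdx] 1 Vorbis.L.__asan_store1_noabort.entry)
    (hst2 : Asan.SmallCheck Lay μ Vorbis.WayInv (Vorbis.CodeOK u₀) [.rax, .rcx, .rdx] 2 Vorbis.L.__asan_store2_noabort.entry)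
    (hst4 : Asan.SmallCheck Lay μ Vorbis.WayInv (Vorbis.CodeOK u₀) [.rax, .rcx, .rdx] 4 Vorbis.L.__asan_store4_noabort.entry)
    {g : Ghost} {i : Nat} {A5 : Arena} {A : Arena × List Obj} {mc : Int} {n : Nat} {v : State}
    (hat : AtF5c u₀ g i A5 A mc n v) :
    ReachVia Lay μ WayInv v (fun w => F5Outer u₀ g i A5 A mc n (Floor1.partitions v.mem (floorAt g v.mem i)) 0 w) := by
  have hb := hat.in5
  have hf := hb.loop.frame
  have he := hf.entry
  v_entry he
  obtain ⟨r8, rlo, rhi, ra, flo, fhi, fstack, farena, flog, fc1, fc64, ilt, gdef, blo, bhi, btext, bstack, bdata, blog⟩ := hb.geo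
  obtain ⟨z, hzlt, c_rax⟩ : ∃ z, z < 16 ∧ v.reg .rax = UInt64.ofNat z := ⟨_, hat.rax, (UInt64.ofNat_toNat).symm⟩
  have hsite1 := hb.site 0x635 1 (by omega) (by simp only [voff]; omega)
  have hsite2 := hb.site 0x152 2 (by omega) (by simp only [voff]; omega)
  have hsite3 := hb.site 0x154 2 (by omega) (by simp only [voff]; omega)
  have hsite4 := hb.site 0x638 4 (by omega) (by simp only [voff]; omega)
  -- the three addresses as numbers (the walker sees `UInt64.ofNat R`, not `addr g.R`)
  obtain ⟨R, hR⟩ : ∃ R, R = g.R := ⟨_, rfl⟩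
  obtain ⟨f, hfe⟩ : ∃ f, f = g.f := ⟨_, rfl⟩
  obtain ⟨gi, hgi⟩ : ∃ gi, gi = floorAt g v.mem i := ⟨_, rfl⟩
  have c_rip := hf.rip
  have c_rsp := hf.rsp
  have c_rbp := hb.loop.rbp
  have c_rbx := hb.rbx
  rw [← hR] at c_rsp r8 rlo rhi ra fstack
  rw [← hfe] at c_rbp flo fhi fstack farena flog
  rw [← hgi] at c_rbx gdef hsite1 hsite2 hsite3 hsite4
  simp only [addr] at c_rsp c_rbp c_rbx
  have c_eq : Mem.EqOn Vorbis.L.textLo Vorbis.L.textHi u₀.mem v.mem := hf.code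
  have hdf : v.flags .df = false := (show abiInv _ from hf.inv).1
  have hmx : v.mxcsr &&& 0x1F80 = 0x1F80 := (show abiInv _ from hf.inv).2
  have hsse := Vorbis.sseOK_of_abiInv hf.inv
  have hgw : 0x119d40 ≤ gi ∧ gi + 1596 ≤ 0xC00000 ∧ (gi + 1596 ≤ 0x700000 ∨ 0x800000 ≤ gi) := by
    omega
  have hgf : gi + 1596 ≤ f ∨ f + 1808 ≤ gi := by
    omega
  clear fc1 fc64 ilt gdef blo bhi btext bstack bdata blog
  -- the load of the piece, named before the walk: the literal-0 slot Z24
  have hz24 : v.mem.readLE (UInt64.ofNat R + 36) 4 = 0 := by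
    have h := hb.loop.mid.consts.z24 (by omega) (by omega)
    rw [← hR] at h
    have ea : addr (R + 0x24) = UInt64.ofNat R + 36 := by
      apply UInt64.toNat_inj.mp
      rw [toNat_addr _ (by omega)]
      u_omega
    unfold Mem.u32 at h
    rw [ea] at h
    exact h
  u_walk hcode [hμ.vendor, Vorbis.Spec.cnt32_part z] until [Vorbis.L.start_decoder.cut220] span [Vorbis.L.textLo, Vorbis.L.textHi] side (v_side)
  case check_115602 =>
    -- the byte `rangebits`
    have hun : ShadowUntouched v.mem s_115602.mem := by v_untouched
    exact Vorbis.Spec.check_site hf.shadow hun hsite1 (by u_omega)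
  case check_115615 =>
    -- the word `Xlist[0]`
    have hun : ShadowUntouched v.mem s_115615.mem := by v_untouched
    exact Vorbis.Spec.check_site hf.shadow hun hsite2 (by u_omega)
  case check_115637 =>
    -- the word `Xlist[1]`
    have hun : ShadowUntouched v.mem s_115637.mem := by v_untouched
    exact Vorbis.Spec.check_site hf.shadow hun hsite3 (by u_omega)
  case check_11564b =>
    -- the dword `values`
    have hun : ShadowUntouched v.mem s_11564b.mem := by v_untouched
    exact Vorbis.Spec.check_site hf.shadow hun hsite4 (by u_omega)
  · -- the head of loop 4007 (0x1156e6) with `j = 0`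
    rw [f5c_low8 z hzlt, f5c_shl16 z hzlt] at w_mem
    -- `1 << rangebits` as an atom below `2 ^ 16` (so that the word read back is the word stored)
    obtain ⟨pw, hpw⟩ : ∃ pw, pw = 2 ^ z := ⟨_, rfl⟩
    have hpw16 : pw < 65536 := by
      rw [hpw]
      have h1 : 2 ^ z ≤ 2 ^ 15 := Nat.pow_le_pow_right (by omega) (by omega)
      omega
    rw [← hpw] at w_mem
    have hun : ShadowUntouched v.mem s_11565f.mem := by v_untouched
    have hsame : Mem.SameExcept [⟨R - 408, R⟩, ⟨gi + 0x152, gi + 0x156⟩, ⟨gi + 0x635, gi + 0x636⟩,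
        ⟨gi + 0x638, gi + 0x63c⟩] v.mem s_11565f.mem := by
      u_same
    have hws : ∀ w, w ∈ ([⟨R - 408, R⟩, ⟨gi + 0x152, gi + 0x156⟩, ⟨gi + 0x635, gi + 0x636⟩,
        ⟨gi + 0x638, gi + 0x63c⟩] : List Span) → Floor.Quiet g (floorAt g v.mem i) 0x152 0x63c w := by
      intro w hw
      simp only [List.mem_cons, List.mem_nil_iff, or_false] at hw
      unfold Floor.Quiet
      rw [← hR, ← hgi]
      rcases hw with rfl | rfl | rfl | rfl
      all_goals simp only []
      all_goals omega
    have hbits : Bits (g.Blk A) g.len s_11565f.mem g.f :=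
      Floor.bits_quiet hb.geo hb.loop.mid.bits hsame hws (by omega)
    have hinv : abiInv s_11565f := by
      refine Vorbis.abiInv_of ?_ ?_
      · rw [w_flags]
        exact w_df_11564b
      · rw [w_mxcsr]
        exact hmx
    have e1 : s_11565f.reg .rsp = addr g.R := by
      rw [w_rsp, hR]
      rfl
    have e2 : s_11565f.reg .rbp = addr g.f := by
      rw [w_kept .rbp rfl, c_rbp, hfe]
      rfl
    have e3 : s_11565f.reg .rbx = addr (floorAt g v.mem i) := by
      rw [w_kept .rbx rfl, c_rbx, hgi]
      rfl
    have e4 : s_11565f.reg .r13 = addr 0 := by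
      rw [w_r13]
      rfl
    have hin := hb.keep w_rip e1 e2 e3 hinv w_eq hsame (fun w hw => (hws w hw).win) (by omega) (by omega) (by omega) hun
      hbits
    obtain ⟨eG, _, _, _⟩ := Floor.fields_same hb.geo hsame (fun w hw => (hws w hw).win) (by omega)
    -- what the element still reads the same: the class tables, and `[G+156H, G+635H)` with `floor1_multiplier`
    have hlow : Mem.EqOn gi (gi + 0x152) v.mem s_11565f.mem := by
      apply hsame.eqOn
      intro w hw
      simp only [List.mem_cons, List.mem_nil_iff, or_false] at hw
      rcases hw with rfl | rfl | rfl | rfl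
      all_goals simp only []
      all_goals omega
    have hmid : Mem.EqOn (gi + 0x156) (gi + 0x635) v.mem s_11565f.mem := by
      apply hsame.eqOn
      intro w hw
      simp only [List.mem_cons, List.mem_nil_iff, or_false] at hw
      rcases hw with rfl | rfl | rfl | rfl
      all_goals simp only []
      all_goals omega
    have hpar : Floor1.partitions s_11565f.mem gi = Floor1.partitions v.mem gi := by
      simp only [vacc, voff]
      exact hlow.u8 _ (by omega) (by omega) (by omega)
    have hmul : Floor1.floor1_multiplier s_11565f.mem gi = Floor1.floor1_multiplier v.mem gi := by
      simp only [vacc, voff]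
      exact hmid.u8 _ (by omega) (by omega) (by omega)
    -- the four new values, read back
    have ea1 : addr (gi + 1589) = UInt64.ofNat gi + 1589 := by
      apply UInt64.toNat_inj.mp
      rw [toNat_addr _ (by omega)]
      u_omega
    have ea2 : addr (gi + 338 + 2 * 0) = UInt64.ofNat gi + 338 := by
      apply UInt64.toNat_inj.mp
      rw [toNat_addr _ (by omega)]
      u_omega
    have ea3 : addr (gi + 338 + 2 * 1) = UInt64.ofNat gi + 340 := by
      apply UInt64.toNat_inj.mp
      rw [toNat_addr _ (by omega)]
      u_omega
    have ea4 : addr (gi + 1592) = UInt64.ofNat gi + 1592 := by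
      apply UInt64.toNat_inj.mp
      rw [toNat_addr _ (by omega)]
      u_omega
    obtain ⟨g1, g2, g3⟩ := hgw
    have hrbv : Floor1.rangebits s_11565f.mem gi = z := by
      simp only [vacc, voff]
      unfold Mem.u8
      rw [ea1]
      rcases g3 with g3 | g3
      · u_read
      · u_read
    have hx0 : Floor1.Xlist s_11565f.mem gi 0 = 0 := by
      simp only [vacc, voff]
      unfold Mem.u16
      rw [ea2]
      rcases g3 with g3 | g3
      · u_read
      · u_read
    have hx1 : Floor1.Xlist s_11565f.mem gi 1 = pw := by
      simp only [vacc, voff]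
      unfold Mem.u16
      rw [ea3]
      rcases g3 with g3 | g3
      · u_read
      · u_read
    have hvv : Floor1.values s_11565f.mem gi = 2 := by
      simp only [vacc, voff]
      rw [w_mem, ← ea4, Mem.i32_writeLE_same]
      rfl
    rw [hgi] at hpar hmul hrbv hx0 hx1 hvv
    refine ReachVia.done (hat.first_outer hin eG hpar hmul ?_ hx0 ?_ hvv e4)
    · rw [hrbv]
      omega
    · rw [hx1, hrbv, hpw]

end Vorbis.Spec.start_decoder_F5c

/-- Unit `start_decoder.F5c`: `f5c_walk` at every entry state. -/
theorem Vorbis.Spec.Worked.start_decoder_F5c_ok : Vorbis.Spec.start_decoder_F5c.Statement := by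
  intro Lay hLay μ hμ u₀ hcode hst1 hst2 hst4 g i A5 A mc n v hat
  exact Vorbis.Spec.start_decoder_F5c.f5c_walk hLay hμ hcode hst1 hst2 hst4 hat
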